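-- pv_equiv track=rewrite | github.com/beebel/HackBulgaria | Programming0/week3/4-Problems-Construction/solutions/1. lyulinCity/solution/lyulin_city.py | towersToSee
-- ===== SOURCE A (Python) =====
-- def towersToSee(towers):
--     count = 1
--     highest = towers[0]
--     for i in range(len(towers)):
--         if towers[i] > highest:
--             highest = towers[i]
--             count += 1
--
--     return count
-- ===== SOURCE B (Python) =====
-- def towersToSee(towers):
--     first = towers[0]
--     return 1 + sum(1 for i in range(1, len(towers)) if towers[i] > max(towers[:i]))
-- ===== Notes on version B (the rewrite author's own statement) =====
-- stated objective: alternative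
-- what changed: Replaces A's single-pass running-max loop with a direct definition of visibility: count indices i >= 1 whose tower strictly exceeds max(towers[:i]), plus 1 for the first tower.
import Mathlib
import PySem

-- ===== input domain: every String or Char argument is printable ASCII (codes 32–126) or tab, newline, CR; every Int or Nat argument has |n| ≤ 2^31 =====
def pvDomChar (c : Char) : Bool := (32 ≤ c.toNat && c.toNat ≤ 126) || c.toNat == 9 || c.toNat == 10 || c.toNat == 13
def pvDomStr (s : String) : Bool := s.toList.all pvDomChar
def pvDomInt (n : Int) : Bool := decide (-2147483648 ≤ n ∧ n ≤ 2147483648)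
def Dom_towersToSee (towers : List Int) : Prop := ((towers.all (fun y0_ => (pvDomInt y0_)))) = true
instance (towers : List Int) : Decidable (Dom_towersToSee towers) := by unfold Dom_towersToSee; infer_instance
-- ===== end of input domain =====

-- B replaces A's running-max loop by the direct visibility definition towers[i] > max(towers[:i])
-- (alternative decomposition, not faster); equivalence is about the return value only.

-- ===== PORT A =====
def towersToSee (towers : List Int) : Int :=
  let highest := PySem.List.pyGetD towers 0 0   -- first element; Pre_ excludes the empty list (IndexError)
  ((PySem.List.pyRange 0 (PySem.List.len towers) 1).foldl
    (fun (s : Int × Int) i =>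
      if PySem.List.pyGetD towers i 0 > s.2 then (s.1 + 1, PySem.List.pyGetD towers i 0) else s)
    (1, highest)).1

-- ===== PORT B =====
def towersToSee_alt (towers : List Int) : Int :=
  let _first := PySem.List.pyGetD towers 0 0    -- first element; read only to raise on the empty list
  1 + (PySem.List.pyRange 1 (PySem.List.len towers) 1).foldl
    (fun acc i =>
      acc + (if PySem.List.pyGetD towers i 0 >
               ((PySem.List.max? (PySem.List.slice towers (some 0) (some i)) (fun y => y)).getD 0)
             then 1 else 0)) 0

-- ===== PRECONDITION & SPEC =====
-- Pre_ excludes only the empty list, on which both A and B raise IndexError reading the first element.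
def Pre_towersToSee (towers : List Int) : Prop := towers ≠ []
instance (towers : List Int) : Decidable (Pre_towersToSee towers) := by unfold Pre_towersToSee; infer_instance
def pvWitness_towersToSee : List Int := [3, 1, 4, 1, 5]

def Spec_towersToSee (towers : List Int) (out : Int) : Prop := out = towersToSee_alt towers
instance (towers : List Int) (out : Int) : Decidable (Spec_towersToSee towers out) := by unfold Spec_towersToSee; infer_instance

-- ===== CLAIM (what is proved, stated in full; the proofs are below) =====
def Claim_equal_towersToSee : Prop := ∀ (towers : List Int), Dom_towersToSee towers → Pre_towersToSee towers → Spec_towersToSee towers (towersToSee towers)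

-- ===== LEMMAS AND PROOFS =====

-- reference count: number of new records in t when the running maximum starts at h
def pvCnt (h : Int) : List Int → Int
  | [] => 0
  | x :: xs => (if x > h then 1 else 0) + pvCnt (max h x) xs

theorem pvCnt_foldA (t : List Int) : ∀ (c h : Int),
    (t.foldl (fun (s : Int × Int) x => if x > s.2 then (s.1 + 1, x) else s) (c, h)).1
      = c + pvCnt h t := by
  induction t with
  | nil => intro c h; simp [pvCnt]
  | cons x xs ih =>
    intro c h
    by_cases hx : x > h
    · simp [pvCnt, hx, ih, max_eq_right (le_of_lt hx)]; ring
    · simp [pvCnt, hx, ih, max_eq_left (le_of_not_gt hx)]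

theorem pvCnt_foldB (t : List Int) : ∀ (h init : Int),
    ((List.range t.length).foldl
       (fun acc k => acc + (if t.getD k 0 > (t.take k).foldl max h then 1 else 0)) init)
      = init + pvCnt h t := by
  induction t with
  | nil => intro h init; simp [pvCnt]
  | cons x xs ih =>
    intro h init
    rw [List.length_cons, List.range_succ_eq_map, List.foldl_cons, List.foldl_map]
    simp only [List.getD_cons_succ, List.take_succ_cons, List.foldl_cons, List.getD_cons_zero,
      List.take_zero, List.foldl_nil]
    rw [ih (max h x)]
    simp [pvCnt]; ring

theorem towersToSee_cons (h : Int) (t : List Int) :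
    towersToSee (h :: t) = 1 + pvCnt h t := by
  show ((PySem.List.pyRange 0 (PySem.List.len (h :: t)) 1).foldl
      (fun (s : Int × Int) i =>
        if PySem.List.pyGetD (h :: t) i 0 > s.2 then (s.1 + 1, PySem.List.pyGetD (h :: t) i 0) else s)
      (1, PySem.List.pyGetD (h :: t) 0 0)).1 = 1 + pvCnt h t
  rw [PySem.List.foldl_pyRange_zero_pyGetD (h :: t) 0
        (fun (s : Int × Int) x => if x > s.2 then (s.1 + 1, x) else s)]
  simp only [PySem.List.pyGetD, PySem.List.pyIdx?, PySem.List.pyGet?]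
  simp only [List.foldl_cons]
  simp [pvCnt_foldA]

theorem towersToSee_alt_cons (h : Int) (t : List Int) :
    towersToSee_alt (h :: t) = 1 + pvCnt h t := by
  show 1 + (PySem.List.pyRange 1 (PySem.List.len (h :: t)) 1).foldl
      (fun acc i => acc + (if PySem.List.pyGetD (h :: t) i 0 >
        ((PySem.List.max? (PySem.List.slice (h :: t) (some 0) (some i)) (fun y => y)).getD 0)
        then 1 else 0)) 0
    = 1 + pvCnt h t
  have hlen : PySem.List.len (h :: t) = ((t.length : Int) + 1) := by
    simp [PySem.List.len_eq]
  rw [hlen, PySem.List.pyRange_one]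
  have htn : (((t.length : Int) + 1) - 1).toNat = t.length := by omega
  rw [htn, List.foldl_map]
  congr 1
  rw [PySem.List.foldl_congr_mem
    (g := fun acc (k : Nat) => acc + (if t.getD k 0 > (t.take k).foldl max h then 1 else 0))]
  · rw [pvCnt_foldB]; ring
  · intro acc k hk
    rw [List.mem_range] at hk
    have hcast : (1 : Int) + (k : Int) = (((k + 1 : Nat)) : Int) := by push_cast; ring
    rw [hcast, PySem.List.pyGetD_natCast, PySem.List.slice_zero_start,
        PySem.List.slice_to_natCast, List.take_succ_cons, PySem.List.max?_id_cons,
        List.getD_cons_succ]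
    simp

-- ===== VERDICT (by name: the statement is the Claim_ definition above) =====
theorem towersToSee_spec : Claim_equal_towersToSee := by
  intro towers _ hpre
  unfold Spec_towersToSee
  cases towers with
  | nil => exact absurd rfl hpre
  | cons h t => rw [towersToSee_cons, towersToSee_alt_cons]
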